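-- pv_equiv track=rewrite | github.com/CohanCohen/Spaghetti-calculator | pySpgCal/pySpgCal.py | ins_star
-- ===== SOURCE A (Python) =====
-- def isspec(c):
--     if 33<=ord(c)<=47 and ord(c) not in [40, 41]:
--         return 1
--     if ord(c) == 94:
--         return 1
--     if c == "_":
--         return 1
--     return 0
--
-- def isnumber(c):
--     if 48<=ord(c)<=57:
--         return 1
--     return 0
--
-- def ins_star(string):
--     new_string = string[:]
--     k = len(new_string) - 1
--     i = 0
--     while i < k:
--         if isnumber(new_string[i]) + isnumber(new_string[i+1]) == 1:
--             if new_string[i+1] != ")" and new_string[i] != "(" :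
--                 if isspec(new_string[i]) + isspec(new_string[i+1]) == 0:
--                     new_string = new_string[:i+1] + "*" + new_string[i+1:]
--                     k+=1
--         if new_string[i] == ")" and 97<=ord(new_string[i+1])<=122:
--             new_string = new_string[:i+1] + "*" + new_string[i+1:]
--             k+=1
--         i += 1
--     return new_string
-- ===== SOURCE B (Python) =====
-- SPEC = set("!\"#$%&'*+,-./^_")
--
-- def _boundary(a, b):
--     if ((48 <= ord(a) <= 57) != (48 <= ord(b) <= 57)) and b != ')' and a != '(' \
--             and a not in SPEC and b not in SPEC:
--         return True
--     return a == ')' and 97 <= ord(b) <= 122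
--
-- def ins_star(string):
--     out = []
--     for a, b in zip(string, string[1:]):
--         out.append(a)
--         if _boundary(a, b):
--             out.append('*')
--     return ''.join(out) + string[-1:]
-- ===== Notes on version B (the rewrite author's own statement) =====
-- stated objective: simpler
-- what changed: Replaces A's index-walking while loop that re-slices and re-builds the whole string at every insertion with a single left-to-right pass over the adjacent pairs of the original string, appending to an output buffer.
import Mathlib
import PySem

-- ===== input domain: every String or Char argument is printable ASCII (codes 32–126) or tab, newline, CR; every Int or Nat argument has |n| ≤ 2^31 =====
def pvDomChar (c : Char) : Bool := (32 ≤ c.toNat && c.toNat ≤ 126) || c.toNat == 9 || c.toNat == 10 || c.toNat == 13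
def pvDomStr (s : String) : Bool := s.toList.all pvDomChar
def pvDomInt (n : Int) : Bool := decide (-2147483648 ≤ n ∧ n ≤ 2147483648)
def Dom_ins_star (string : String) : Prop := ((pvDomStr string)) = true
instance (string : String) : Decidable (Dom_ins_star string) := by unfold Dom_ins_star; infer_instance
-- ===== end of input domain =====

-- B replaces A's index-walking while loop with repeated whole-string re-slicing by a single
-- left-to-right pass over the adjacent pairs of the ORIGINAL string (objective: simpler).


-- ===== PORT A =====
def isspec (c : Char) : Int :=
  if 33 ≤ c.toNat ∧ c.toNat ≤ 47 ∧ c.toNat ≠ 40 ∧ c.toNat ≠ 41 then 1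
  else if c.toNat = 94 then 1
  else if c = '_' then 1
  else 0

def isnumber (c : Char) : Int :=
  if 48 ≤ c.toNat ∧ c.toNat ≤ 57 then 1 else 0

-- A's while loop: state (new_string, k, i); fuel = 2*len+1 always suffices (each iteration
-- advances i by 1 and an insertion is never followed by another at the next position).
-- Indexing is via getD: the guard i < k keeps every access in range, so this is exact.
def insStarLoop : Nat → List Char → Nat → Nat → List Char
  | 0, s, _, _ => s
  | fuel + 1, s, k, i =>
    if i < k then
      let p :=
        if isnumber (s.getD i ' ') + isnumber (s.getD (i+1) ' ') = 1 ∧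
           s.getD (i+1) ' ' ≠ ')' ∧ s.getD i ' ' ≠ '(' ∧
           isspec (s.getD i ' ') + isspec (s.getD (i+1) ' ') = 0 then
          (s.take (i+1) ++ '*' :: s.drop (i+1), k + 1)
        else (s, k)
      let q :=
        if p.1.getD i ' ' = ')' ∧ 97 ≤ (p.1.getD (i+1) ' ').toNat ∧ (p.1.getD (i+1) ' ').toNat ≤ 122 then
          (p.1.take (i+1) ++ '*' :: p.1.drop (i+1), p.2 + 1)
        else p
      insStarLoop fuel q.1 q.2 (i + 1)
    else s

def ins_star (string : String) : String :=
  let s := string.toList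
  String.mk (insStarLoop (2 * s.length + 1) s (s.length - 1) 0)

-- ===== PORT B =====
def inSpecB (c : Char) : Bool := "!\"#$%&'*+,-./^_".toList.contains c

def boundaryB (a b : Char) : Bool :=
  if ((decide (48 ≤ a.toNat ∧ a.toNat ≤ 57)) != (decide (48 ≤ b.toNat ∧ b.toNat ≤ 57)))
      && !(b == ')') && !(a == '(') && !(inSpecB a) && !(inSpecB b) then
    true
  else (a == ')') && decide (97 ≤ b.toNat ∧ b.toNat ≤ 122)

-- Source B's single pass over the adjacent pairs (each step sees the pair (a,b), emits a and
-- possibly '*'; the singleton case is the final `string[-1:]` append).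
def bpairs : List Char → List Char
  | [] => []
  | [a] => [a]
  | a :: b :: t =>
    if boundaryB a b then a :: '*' :: bpairs (b :: t) else a :: bpairs (b :: t)

def ins_star_alt (string : String) : String :=
  String.mk (bpairs string.toList)

-- ===== PRECONDITION & SPEC =====
def Spec_ins_star (string : String) (out : String) : Prop := out = ins_star_alt string
instance (string : String) (out : String) : Decidable (Spec_ins_star string out) := by unfold Spec_ins_star; infer_instance

-- ===== CLAIM (what is proved, stated in full; the proofs are below) =====
def Claim_equal_ins_star : Prop := ∀ (string : String), Dom_ins_star string → Spec_ins_star string (ins_star string)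

-- ===== LEMMAS AND PROOFS =====

-- Rule-1 condition of A, as a Prop on the pair of characters.
def C1 (a b : Char) : Prop :=
  isnumber a + isnumber b = 1 ∧ b ≠ ')' ∧ a ≠ '(' ∧ isspec a + isspec b = 0

-- Rule-2 condition of A.
def C2 (a b : Char) : Prop :=
  a = ')' ∧ 97 ≤ b.toNat ∧ b.toNat ≤ 122

lemma char_eq_iff (a b : Char) : a = b ↔ a.toNat = b.toNat := eq_iff_eq_of_cmp_eq_cmp rfl

lemma isspec_eq (c : Char) : isspec c = if inSpecB c then 1 else 0 := by
  simp only [isspec, inSpecB, List.contains_eq_mem, decide_eq_true_eq,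
    show "!\"#$%&'*+,-./^_".toList = ['!','"','#','$','%','&','\'','*','+',',','-','.','/','^','_'] from rfl,
    List.mem_cons, char_eq_iff]
  norm_num
  split_ifs <;> simp_all <;> omega

lemma boundaryB_iff (a b : Char) : boundaryB a b = true ↔ C1 a b ∨ C2 a b := by
  unfold boundaryB C1 C2
  rw [isspec_eq a, isspec_eq b]
  simp only [isnumber, beq_iff_eq, char_eq_iff]
  by_cases ha : 48 ≤ a.toNat ∧ a.toNat ≤ 57 <;>
    by_cases hb : 48 ≤ b.toNat ∧ b.toNat ≤ 57 <;>
      by_cases hsa : inSpecB a = true <;>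
        by_cases hsb : inSpecB b = true <;>
          simp [ha, hb, hsa, hsb, char_eq_iff] <;> omega

lemma C1_star (b : Char) : ¬ C1 '*' b := by
  rintro ⟨-, -, -, h0⟩
  rw [isspec_eq, isspec_eq] at h0
  rw [show inSpecB '*' = true from rfl, if_pos rfl] at h0
  split_ifs at h0 <;> omega

lemma getD_app0 (u r : List Char) (d : Char) : (u ++ r).getD u.length d = r.getD 0 d := by
  simp [List.getD, List.getElem?_append_right]

lemma getD_app1 (u r : List Char) (d : Char) : (u ++ r).getD (u.length + 1) d = r.getD 1 d := by
  simp [List.getD, List.getElem?_append_right (by omega : u.length ≤ u.length + 1)]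

lemma take_app1 (u r : List Char) (a : Char) : (u ++ a :: r).take (u.length + 1) = u ++ [a] := by
  rw [List.take_append]; simp

lemma drop_app1 (u r : List Char) (a : Char) : (u ++ a :: r).drop (u.length + 1) = r := by
  rw [List.drop_append]; simp

lemma loop_step_star (u' : List Char) (b : Char) (t : List Char) (f : Nat) :
    insStarLoop (f + 1) (u' ++ '*' :: b :: t) (u'.length + t.length + 1) u'.length
      = insStarLoop f ((u' ++ ['*']) ++ b :: t) (u'.length + t.length + 1) (u'.length + 1) := by
  rw [insStarLoop]
  rw [if_pos (by omega : u'.length < u'.length + t.length + 1)]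
  simp only [getD_app0, getD_app1, List.getD_cons_zero, List.getD_cons_succ]
  rw [if_neg (show ¬(isnumber '*' + isnumber b = 1 ∧ b ≠ ')' ∧ '*' ≠ '(' ∧
      isspec '*' + isspec b = 0) from fun h => C1_star b h)]
  simp only [getD_app0, getD_app1, List.getD_cons_zero, List.getD_cons_succ]
  rw [if_neg (by rintro ⟨h, -⟩; exact absurd h (by decide))]
  have h3 : u' ++ '*' :: b :: t = (u' ++ ['*']) ++ b :: t := by simp
  rw [h3]

lemma loop_bpairs : ∀ (rest u : List Char) (fuel : Nat),
    2 * rest.length ≤ fuel →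
    insStarLoop fuel (u ++ rest) (u.length + rest.length - 1) u.length = u ++ bpairs rest := by
  intro rest
  induction rest with
  | nil =>
    intro u fuel _
    cases fuel with
    | zero => simp [insStarLoop, bpairs]
    | succ f => simp [insStarLoop, bpairs]
  | cons a rest ih =>
    intro u fuel hfuel
    simp only [List.length_cons] at hfuel
    cases rest with
    | nil =>
      cases fuel with
      | zero => omega
      | succ f => simp [insStarLoop, bpairs]
    | cons b t =>
      simp only [List.length_cons] at hfuel
      obtain ⟨f', rfl⟩ : ∃ f', fuel = f' + 1 + 1 := ⟨fuel - 2, by omega⟩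
      have hk : u.length + (a :: b :: t).length - 1 = u.length + t.length + 1 := by
        simp; omega
      rw [hk, insStarLoop]
      rw [if_pos (by omega : u.length < u.length + t.length + 1)]
      simp only [getD_app0, getD_app1, List.getD_cons_zero, List.getD_cons_succ,
        take_app1, drop_app1]
      -- after an insertion the loop continues at i+1 on the pair ('*', b), which fires no rule
      have hins : insStarLoop (f' + 1) (u ++ a :: '*' :: b :: t)
          (u.length + t.length + 2) (u.length + 1)
          = u ++ a :: '*' :: bpairs (b :: t) := by
        rw [show u ++ a :: '*' :: b :: t = (u ++ [a]) ++ '*' :: b :: t from by simp,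
            show u.length + t.length + 2 = (u ++ [a]).length + t.length + 1 from (by simp only [List.length_append, List.length_cons, List.length_nil] <;> omega),
            show u.length + 1 = (u ++ [a]).length from (by simp only [List.length_append, List.length_cons, List.length_nil] <;> omega),
            loop_step_star]
        rw [show (u ++ [a]) ++ ['*'] = u ++ [a, '*'] from by simp]
        rw [show (u ++ [a]).length + t.length + 1 = (u ++ [a, '*']).length + (b :: t).length - 1 from (by simp only [List.length_append, List.length_cons, List.length_nil] <;> omega),
            show (u ++ [a]).length + 1 = (u ++ [a, '*']).length from (by simp only [List.length_append, List.length_cons, List.length_nil] <;> omega)]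
        rw [ih (u ++ [a, '*']) f' (by simp only [List.length_cons]; omega)]
        simp
      by_cases h1 : isnumber a + isnumber b = 1 ∧ b ≠ ')' ∧ a ≠ '(' ∧ isspec a + isspec b = 0
      · simp only [if_pos h1, List.append_assoc, List.singleton_append,
          getD_app0, getD_app1, List.getD_cons_zero, List.getD_cons_succ]
        rw [if_neg (by rintro ⟨-, h, -⟩; exact absurd h (by decide))]
        have hB : boundaryB a b = true := (boundaryB_iff a b).mpr (Or.inl h1)
        rw [show u.length + t.length + 1 + 1 = u.length + t.length + 2 from by omega, hins]
        simp [bpairs, hB]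
      · simp only [if_neg h1, getD_app0, getD_app1, List.getD_cons_zero, List.getD_cons_succ]
        by_cases h2 : a = ')' ∧ 97 ≤ b.toNat ∧ b.toNat ≤ 122
        · rw [if_pos h2]
          simp only [take_app1, drop_app1, List.append_assoc, List.singleton_append]
          have hB : boundaryB a b = true := (boundaryB_iff a b).mpr (Or.inr h2)
          rw [show u.length + t.length + 1 + 1 = u.length + t.length + 2 from by omega, hins]
          simp [bpairs, hB]
        · rw [if_neg h2]
          have hB : boundaryB a b = false := by
            rcases Bool.eq_false_or_eq_true (boundaryB a b) with h | h
            · rcases (boundaryB_iff a b).mp h with hc | hc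
              · exact absurd hc h1
              · exact absurd hc h2
            · exact h
          rw [show u ++ a :: b :: t = (u ++ [a]) ++ b :: t from by simp,
              show u.length + t.length + 1 = (u ++ [a]).length + (b :: t).length - 1 from (by simp only [List.length_append, List.length_cons, List.length_nil] <;> omega),
              show u.length + 1 = (u ++ [a]).length from (by simp only [List.length_append, List.length_cons, List.length_nil] <;> omega)]
          rw [ih (u ++ [a]) (f' + 1) (by simp only [List.length_cons]; omega)]
          simp [bpairs, hB]

-- ===== VERDICT (by name: the statement is the Claim_ definition above) =====
theorem ins_star_spec : Claim_equal_ins_star := by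
  intro s _
  unfold Spec_ins_star ins_star ins_star_alt
  have h := loop_bpairs s.toList [] (2 * s.toList.length + 1) (by omega)
  simpa using congrArg String.mk h
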